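-- pv_equiv track=rewrite | github.com/adamlynam/advent-2024 | src/day7.py | equation_true
-- ===== SOURCE A (Python) =====
-- def equation_true(target: int, numbers: list[int]) -> bool:
--     if len(numbers) == 1 and target == numbers[0]:
--         return True
--     elif (len(numbers) == 1) and target != numbers[0]:
--         return False
--     else:
--         return equation_true(
--             target, [numbers[0] * numbers[1]] + numbers[2:]
--         ) or equation_true(target, [numbers[0] + numbers[1]] + numbers[2:])
-- ===== SOURCE B (Python) =====
-- def equation_true(target: int, numbers: list[int]) -> bool:
--     reachable = {numbers[0]}
--     for num in numbers[1:]: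
--         reachable = {r for v in reachable for r in (v * num, v + num)}
--     return target in reachable
-- ===== Notes on version B (the rewrite author's own statement) =====
-- stated objective: alternative
-- what changed: Replaced A's exponential top-down binary recursion over operator choices by a single left-to-right pass maintaining the deduplicated set of reachable partial values.
import Mathlib
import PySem

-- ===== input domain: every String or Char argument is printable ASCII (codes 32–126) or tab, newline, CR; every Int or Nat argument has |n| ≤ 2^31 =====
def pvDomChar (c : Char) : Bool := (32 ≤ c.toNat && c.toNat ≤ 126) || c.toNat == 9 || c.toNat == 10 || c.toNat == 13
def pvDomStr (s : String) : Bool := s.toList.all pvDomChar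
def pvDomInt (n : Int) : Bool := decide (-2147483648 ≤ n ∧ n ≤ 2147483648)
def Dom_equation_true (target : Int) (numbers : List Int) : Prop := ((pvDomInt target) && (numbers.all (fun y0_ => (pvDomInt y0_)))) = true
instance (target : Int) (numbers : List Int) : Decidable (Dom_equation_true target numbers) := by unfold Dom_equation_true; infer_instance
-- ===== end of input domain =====

-- B replaces A's top-down recursion over operator choices by one forward pass
-- maintaining the deduplicated set of reachable partial values (objective: alternative).
-- Pre_ excludes the empty list, on which A raises IndexError.


-- ===== PORT A =====
def equation_true (target : Int) (numbers : List Int) : Bool :=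
  match numbers with
  | [] => false        -- unreachable under Pre_: Python raises IndexError on []
  | [x] => if target == x then true else false
  | x :: y :: rest =>
      equation_true target ((x * y) :: rest) || equation_true target ((x + y) :: rest)
termination_by numbers.length

-- ===== PORT B =====
-- one step of the forward pass: all values reachable from `reachable` using `num`
def etStep (reachable : PySem.Set Int) (num : Int) : PySem.Set Int :=
  PySem.Set.ofList (reachable.flatMap (fun v => [v * num, v + num]))

def equation_true_alt (target : Int) (numbers : List Int) : Bool :=
  match numbers with
  | [] => false        -- unreachable under Pre_: Python raises IndexError on []
  | x :: rest =>
      let reachable := rest.foldl etStep (PySem.Set.ofList [x])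
      PySem.Set.contains reachable target

-- ===== PRECONDITION & SPEC =====
-- Pre_ excludes exactly the empty list, on which Python A raises IndexError.
def Pre_equation_true (target : Int) (numbers : List Int) : Prop := numbers ≠ []
instance (target : Int) (numbers : List Int) : Decidable (Pre_equation_true target numbers) := by unfold Pre_equation_true; infer_instance
def pvWitness_equation_true : Int × List Int := (7, [3, 4])

def Spec_equation_true (target : Int) (numbers : List Int) (out : Bool) : Prop := out = equation_true_alt target numbers
instance (target : Int) (numbers : List Int) (out : Bool) : Decidable (Spec_equation_true target numbers out) := by unfold Spec_equation_true; infer_instance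

-- ===== CLAIM (what is proved, stated in full; the proofs are below) =====
def Claim_equal_equation_true : Prop := ∀ (target : Int) (numbers : List Int), Dom_equation_true target numbers → Pre_equation_true target numbers → Spec_equation_true target numbers (equation_true target numbers)

-- ===== LEMMAS AND PROOFS =====

-- membership in the fold from a set S decomposes over the elements of S
theorem mem_foldl_etStep (target : Int) (rest : List Int) (S : PySem.Set Int) :
    target ∈ rest.foldl etStep S ↔ ∃ v ∈ S, target ∈ rest.foldl etStep (PySem.Set.ofList [v]) := by
  induction rest generalizing S with
  | nil =>
      simp [PySem.Set.mem_ofList]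
  | cons y rs ih =>
      simp only [List.foldl_cons]
      rw [ih (etStep S y)]
      constructor
      · rintro ⟨w, hw, hmem⟩
        have : w ∈ S.flatMap (fun v => [v * y, v + y]) := by
          simpa [etStep, PySem.Set.mem_ofList] using hw
        rcases List.mem_flatMap.mp this with ⟨v, hv, hw2⟩
        refine ⟨v, hv, ?_⟩
        rw [ih (etStep (PySem.Set.ofList [v]) y)]
        refine ⟨w, ?_, hmem⟩
        simp only [etStep, PySem.Set.mem_ofList, List.mem_flatMap]
        exact ⟨v, by simp [PySem.Set.mem_ofList], hw2⟩
      · rintro ⟨v, hv, hmem⟩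
        rw [ih (etStep (PySem.Set.ofList [v]) y)] at hmem
        rcases hmem with ⟨w, hw, hmem⟩
        refine ⟨w, ?_, hmem⟩
        have hw2 : w ∈ [v * y, v + y] := by
          have : w ∈ (PySem.Set.ofList [v] : List Int).flatMap (fun u => [u * y, u + y]) := by
            simpa [etStep, PySem.Set.mem_ofList] using hw
          simpa [PySem.Set.ofList, PySem.Set.add] using this
        simp only [etStep, PySem.Set.mem_ofList, List.mem_flatMap]
        exact ⟨v, hv, hw2⟩

-- A on a nonempty list decides membership in the forward-pass reachable set
theorem mem_etStep_single (y v x : Int) :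
    v ∈ etStep (PySem.Set.ofList [x]) y ↔ (v = x * y ∨ v = x + y) := by
  simp [etStep, PySem.Set.mem_ofList, List.mem_flatMap]

theorem equation_true_eq_mem (target x : Int) (rest : List Int) :
    equation_true target (x :: rest) = true ↔ target ∈ rest.foldl etStep (PySem.Set.ofList [x]) := by
  induction rest generalizing x with
  | nil =>
      rw [equation_true]
      simp [PySem.Set.mem_ofList]
  | cons y rs ih =>
      rw [equation_true]
      simp only [List.foldl_cons, Bool.or_eq_true]
      rw [ih (x * y), ih (x + y)]
      rw [mem_foldl_etStep target rs (etStep (PySem.Set.ofList [x]) y)]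
      constructor
      · rintro (h | h)
        · exact ⟨x * y, (mem_etStep_single y (x * y) x).mpr (Or.inl rfl), h⟩
        · exact ⟨x + y, (mem_etStep_single y (x + y) x).mpr (Or.inr rfl), h⟩
      · rintro ⟨v, hv, h⟩
        rcases (mem_etStep_single y v x).mp hv with h1 | h1
        · left; rwa [← h1]
        · right; rwa [← h1]

-- ===== VERDICT (by name: the statement is the Claim_ definition above) =====
theorem equation_true_spec : Claim_equal_equation_true := by
  intro target numbers _ hpre
  unfold Spec_equation_true
  match numbers with
  | [] => exact absurd rfl hpre
  | x :: rest =>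
      have hiff := equation_true_eq_mem target x rest
      simp only [equation_true_alt]
      rw [show (PySem.Set.contains (rest.foldl etStep (PySem.Set.ofList [x])) target)
            = (target ∈ rest.foldl etStep (PySem.Set.ofList [x]) : Bool) by
        simp [PySem.Set.contains, List.contains_eq_mem]]
      by_cases h : target ∈ rest.foldl etStep (PySem.Set.ofList [x])
      · simp [h, hiff.mpr h]
      · simp only [h, decide_false]
        exact Bool.eq_false_iff.mpr (fun hc => h (hiff.mp hc))
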